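-- pv_equiv track=rewrite | github.com/cyguidesltd/cybuddy | src/cybuddy/cli.py | suggest_next
-- ===== SOURCE A (Python) =====
-- def suggest_next(user_text: str) -> str:
--     t = user_text.lower()
--     if any(k in t for k in ["nmap", "scan", "port"]):
--         return (
--             "Try: nmap -sV -Pn -T2 <target>. Start safe; document findings."
--         )
--     if any(k in t for k in ["web", "http", "xss", "sql", "burp"]):
--         return (
--             "Check robots.txt, headers, inputs. Consider Burp with passive scans first."
--         )
--     if any(k in t for k in ["hash", "cipher", "encode", "crypto"]):
--         return (
--             "Identify format (hashid), test small samples, avoid brute-force blindly."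
--         )
--     if any(k in t for k in ["forensic", "image", "pcap", "memory"]):
--         return (
--             "Verify file magic, run strings/hexdump, use appropriate carve/analysis tools."
--         )
--     return (
--         "Break the task down: scope -> safe defaults -> record results -> next step."
--     )
-- ===== SOURCE B (Python) =====
-- # B: flat keyword->group-index map; take the minimum index among all matched
-- # keywords (default 4 = fallback) and index a uniform advice table.
-- _KEYWORD_GROUP = {
--     "nmap": 0, "scan": 0, "port": 0,
--     "web": 1, "http": 1, "xss": 1, "sql": 1, "burp": 1,
--     "hash": 2, "cipher": 2, "encode": 2, "crypto": 2,
--     "forensic": 3, "image": 3, "pcap": 3, "memory": 3,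
-- }
--
-- _ADVICE = [
--     "Try: nmap -sV -Pn -T2 <target>. Start safe; document findings.",
--     "Check robots.txt, headers, inputs. Consider Burp with passive scans first.",
--     "Identify format (hashid), test small samples, avoid brute-force blindly.",
--     "Verify file magic, run strings/hexdump, use appropriate carve/analysis tools.",
--     "Break the task down: scope -> safe defaults -> record results -> next step.",
-- ]
--
--
-- def suggest_next(user_text: str) -> str:
--     t = user_text.lower()
--     best = min((i for k, i in _KEYWORD_GROUP.items() if k in t), default=4)
--     return _ADVICE[best]
-- ===== Notes on version B (the rewrite author's own statement) =====
-- stated objective: alternative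
-- what changed: Replaced the prioritized if-chain of per-group any() tests with a flat keyword->group-index map: collect every matched keyword's index, take the minimum (default 4), and index a uniform five-entry advice table; the min recovers the chain's priority.
import Mathlib
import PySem

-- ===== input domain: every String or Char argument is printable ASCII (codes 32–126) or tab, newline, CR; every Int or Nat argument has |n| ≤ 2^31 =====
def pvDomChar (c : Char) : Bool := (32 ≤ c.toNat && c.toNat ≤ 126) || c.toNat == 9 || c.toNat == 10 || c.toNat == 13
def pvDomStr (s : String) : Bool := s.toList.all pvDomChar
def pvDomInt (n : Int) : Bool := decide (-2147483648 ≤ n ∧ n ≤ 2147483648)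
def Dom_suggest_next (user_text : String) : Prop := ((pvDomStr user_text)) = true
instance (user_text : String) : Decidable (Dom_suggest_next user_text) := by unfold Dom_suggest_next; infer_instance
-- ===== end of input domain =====

-- B replaces the prioritized if-chain by a flat keyword→group-index map: the minimum
-- matched index (default 4) selects from a uniform advice table (objective: alternative).

-- ===== PORT A =====
def suggest_next (user_text : String) : String :=
  let t := PySem.Str.lower user_text
  if ["nmap", "scan", "port"].any (fun k => PySem.Str.isIn k t) then
    "Try: nmap -sV -Pn -T2 <target>. Start safe; document findings."
  else if ["web", "http", "xss", "sql", "burp"].any (fun k => PySem.Str.isIn k t) then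
    "Check robots.txt, headers, inputs. Consider Burp with passive scans first."
  else if ["hash", "cipher", "encode", "crypto"].any (fun k => PySem.Str.isIn k t) then
    "Identify format (hashid), test small samples, avoid brute-force blindly."
  else if ["forensic", "image", "pcap", "memory"].any (fun k => PySem.Str.isIn k t) then
    "Verify file magic, run strings/hexdump, use appropriate carve/analysis tools."
  else
    "Break the task down: scope -> safe defaults -> record results -> next step."

-- ===== PORT B =====
-- _KEYWORD_GROUP dict, as an association list in insertion order (its .items())
def pvKeywordGroup : List (String × Int) :=
  [("nmap", 0), ("scan", 0), ("port", 0),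
   ("web", 1), ("http", 1), ("xss", 1), ("sql", 1), ("burp", 1),
   ("hash", 2), ("cipher", 2), ("encode", 2), ("crypto", 2),
   ("forensic", 3), ("image", 3), ("pcap", 3), ("memory", 3)]

def pvAdvice : List String :=
  ["Try: nmap -sV -Pn -T2 <target>. Start safe; document findings.",
   "Check robots.txt, headers, inputs. Consider Burp with passive scans first.",
   "Identify format (hashid), test small samples, avoid brute-force blindly.",
   "Verify file magic, run strings/hexdump, use appropriate carve/analysis tools.",
   "Break the task down: scope -> safe defaults -> record results -> next step."]

def suggest_next_alt (user_text : String) : String :=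
  let t := PySem.Str.lower user_text
  -- best = min((i for k, i in _KEYWORD_GROUP.items() if k in t), default=4)
  let best : Int :=
    (PySem.List.min? (pvKeywordGroup.filterMap
        (fun ki => if PySem.Str.isIn ki.1 t then some ki.2 else none))
      (fun i => i)).getD 4
  -- _ADVICE[best]; best ∈ [0,4] by construction, so the in-range lookup is exact
  (PySem.List.pyGet? pvAdvice best).getD ""

-- ===== PRECONDITION & SPEC =====
def Spec_suggest_next (user_text : String) (out : String) : Prop := out = suggest_next_alt user_text
instance (user_text : String) (out : String) : Decidable (Spec_suggest_next user_text out) := by unfold Spec_suggest_next; infer_instance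

-- ===== CLAIM (what is proved, stated in full; the proofs are below) =====
def Claim_equal_suggest_next : Prop := ∀ (user_text : String), Dom_suggest_next user_text → Spec_suggest_next user_text (suggest_next user_text)

-- ===== LEMMAS AND PROOFS =====

-- min of a nondecreasing Int list is its head
theorem pvMinIdHead (l : List Int) (h : l.Pairwise (· ≤ ·)) :
    PySem.List.min? l (fun i => i) = l.head? := by
  cases l with
  | nil => simp [PySem.List.min?]
  | cons x t =>
    rw [PySem.List.min?_id_cons]
    simp only [List.head?]
    congr 1
    induction t generalizing x with
    | nil => rfl
    | cons y s ih =>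
      simp only [List.pairwise_cons] at h
      have hxy : x ≤ y := h.1 y (by simp)
      simp only [List.foldl_cons]
      rw [min_eq_left hxy]
      exact ih x (List.pairwise_cons.mpr ⟨fun a ha => h.1 a (List.mem_cons_of_mem _ ha), h.2.2⟩)

theorem pvHeadFilterMap {α β : Type} (f : α → Option β) (l : List α) :
    (l.filterMap f).head? = l.findSome? f := by
  induction l with
  | nil => rfl
  | cons x t ih =>
    simp only [List.filterMap_cons, List.findSome?_cons]
    cases f x <;> simp [ih]

-- a constant-index keyword segment finds its index iff some keyword matches
theorem pvSeg (p : String → Bool) (ks : List String) (c : Int) :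
    List.findSome? (fun ki : String × Int => if p ki.1 then some ki.2 else none)
      (ks.map (fun k => (k, c))) = if ks.any p then some c else none := by
  induction ks with
  | nil => rfl
  | cons k t ih =>
    simp only [List.map_cons, List.findSome?_cons, List.any_cons]
    by_cases hk : p k = true <;> simp [hk, ih]

-- the indices produced by the filterMap over pvKeywordGroup are nondecreasing
theorem pvHitsPairwise (p : String → Bool) :
    (pvKeywordGroup.filterMap
      (fun ki => if p ki.1 then some ki.2 else none)).Pairwise (· ≤ ·) := by
  rw [List.pairwise_filterMap]
  have base : pvKeywordGroup.Pairwise (fun a a' => a.2 ≤ a'.2) := by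
    unfold pvKeywordGroup; decide
  refine base.imp ?_
  intro a a' hle b hb b' hb'
  have hb2 : b = a.2 := by
    by_cases h : p a.1 = true <;> simp [h] at hb; omega
  have hb2' : b' = a'.2 := by
    by_cases h : p a'.1 = true <;> simp [h] at hb'; omega
  omega

-- ===== VERDICT (by name: the statement is the Claim_ definition above) =====
theorem suggest_next_spec : Claim_equal_suggest_next := by
  intro u _
  unfold Spec_suggest_next suggest_next suggest_next_alt
  dsimp only
  have hsplit : pvKeywordGroup =
      (["nmap", "scan", "port"].map (fun k => (k, (0 : Int)))) ++
      (["web", "http", "xss", "sql", "burp"].map (fun k => (k, (1 : Int)))) ++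
      (["hash", "cipher", "encode", "crypto"].map (fun k => (k, (2 : Int)))) ++
      (["forensic", "image", "pcap", "memory"].map (fun k => (k, (3 : Int)))) := rfl
  rw [pvMinIdHead _ (pvHitsPairwise (fun k => PySem.Str.isIn k (PySem.Str.lower u))),
      pvHeadFilterMap, hsplit]
  rw [List.findSome?_append, List.findSome?_append, List.findSome?_append,
      pvSeg (fun k => PySem.Str.isIn k (PySem.Str.lower u)),
      pvSeg (fun k => PySem.Str.isIn k (PySem.Str.lower u)),
      pvSeg (fun k => PySem.Str.isIn k (PySem.Str.lower u)),
      pvSeg (fun k => PySem.Str.isIn k (PySem.Str.lower u))]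
  cases (["nmap", "scan", "port"].any (fun k => PySem.Str.isIn k (PySem.Str.lower u))) <;>
  cases (["web", "http", "xss", "sql", "burp"].any (fun k => PySem.Str.isIn k (PySem.Str.lower u))) <;>
  cases (["hash", "cipher", "encode", "crypto"].any (fun k => PySem.Str.isIn k (PySem.Str.lower u))) <;>
  cases (["forensic", "image", "pcap", "memory"].any (fun k => PySem.Str.isIn k (PySem.Str.lower u))) <;>
  simp [PySem.List.pyGet?, pvAdvice, PySem.List.pyIdx?]
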